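-- pv_equiv track=rewrite | github.com/didogrigorov/Python-Algorithmic-Problems | Two Pointers/Array With Elements Not Equal to Average of Neighbors.py | reaarrangeArray
-- ===== SOURCE A (Python) =====
-- from typing import List
--
-- def reaarrangeArray(nums: List[int]) -> List[int]:
--     nums.sort()
--     result = []
--
--     left, right = 0, len(nums) - 1
--
--     while len(result) != len(nums):
--         result.append(nums[left])
--         left += 1
--
--         if left < right:
--             result.append(nums[right])
--             right -= 1
--
--     return result
-- ===== SOURCE B (Python) =====
-- from typing import List
--
-- def reaarrangeArray(nums: List[int]) -> List[int]:
--     nums.sort()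
--     h = (len(nums) - 1) // 2
--     low = nums[:len(nums) - h]
--     high = nums[len(nums) - h:][::-1]
--     result = [x for pair in zip(low, high) for x in pair]
--     result += low[len(high):]
--     return result
-- ===== Notes on version B (the rewrite author's own statement) =====
-- stated objective: simpler
-- what changed: Replaces A's two-pointer while-loop with manual index bookkeeping by a precomputed split of the sorted list into a low half and a reversed high half, interleaved with zip plus a tail extend.
import Mathlib
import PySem

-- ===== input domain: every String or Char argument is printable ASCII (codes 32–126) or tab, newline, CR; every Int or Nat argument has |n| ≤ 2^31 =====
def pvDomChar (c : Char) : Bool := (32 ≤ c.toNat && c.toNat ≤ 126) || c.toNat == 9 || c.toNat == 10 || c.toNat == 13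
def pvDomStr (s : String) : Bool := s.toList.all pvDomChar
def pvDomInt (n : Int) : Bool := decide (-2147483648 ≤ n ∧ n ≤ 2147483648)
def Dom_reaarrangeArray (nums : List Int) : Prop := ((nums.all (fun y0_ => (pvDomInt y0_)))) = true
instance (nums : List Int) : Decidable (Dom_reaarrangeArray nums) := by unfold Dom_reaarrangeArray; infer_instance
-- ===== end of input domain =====

-- B replaces A's two-pointer while-loop by a split of the sorted list into a low half and a
-- reversed high half interleaved with zip (objective: simpler). Both A and B sort nums in
-- place in Python; the equivalence proved here is about the RETURN value.

-- ===== PORT A =====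
-- the while loop; fuel only bounds the iteration count (length+1 always suffices, each
-- iteration appends at least one element). pyGetD's default 0 is never used: both indices
-- are provably in range whenever they are read.
def pvALoop (s : List Int) (fuel : Nat) (left right : Int) (result : List Int) : List Int :=
  match fuel with
  | 0 => result
  | Nat.succ fuel =>
    if result.length = s.length then result
    else
      if left + 1 < right then
        pvALoop s fuel (left + 1) (right - 1)
          ((result ++ [PySem.List.pyGetD s left 0]) ++ [PySem.List.pyGetD s right 0])
      else
        pvALoop s fuel (left + 1) right (result ++ [PySem.List.pyGetD s left 0])

def reaarrangeArray (nums : List Int) : List Int :=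
  let s := PySem.List.sorted nums id false
  pvALoop s (s.length + 1) 0 ((s.length : Int) - 1) []

-- ===== PORT B =====
-- nums[len(nums)-h:][::-1] is ported with List.reverse (PySem.List.slice?_none_none_neg_one:
-- s[::-1] is reverse); the list comprehension over zip is List.zip + flatMap.
def reaarrangeArray_alt (nums : List Int) : List Int :=
  let s := PySem.List.sorted nums id false
  let h := PySem.Int.floordiv ((s.length : Int) - 1) 2
  let low := PySem.List.slice s none (some ((s.length : Int) - h))
  let high := (PySem.List.slice s (some ((s.length : Int) - h)) none).reverse
  let result := (low.zip high).flatMap (fun p => [p.1, p.2])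
  result ++ PySem.List.slice low (some ((high.length : Nat) : Int)) none

-- ===== PRECONDITION & SPEC =====
def Spec_reaarrangeArray (nums : List Int) (out : List Int) : Prop := out = reaarrangeArray_alt nums
instance (nums : List Int) (out : List Int) : Decidable (Spec_reaarrangeArray nums out) := by unfold Spec_reaarrangeArray; infer_instance

-- ===== CLAIM (what is proved, stated in full; the proofs are below) =====
def Claim_equal_reaarrangeArray : Prop := ∀ (nums : List Int), Dom_reaarrangeArray nums → Spec_reaarrangeArray nums (reaarrangeArray nums)

-- ===== LEMMAS AND PROOFS =====

lemma pvGetMid (pre ys : List Int) (y d : Int) :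
    PySem.List.pyGetD (pre ++ y :: ys) (pre.length : Int) d = y := by
  simp [PySem.List.pyGetD_natCast, List.getD_eq_getElem?_getD]

-- the common normal form of both programs: alternately take from the front and the back
def pvG : List Int → List Int
  | [] => []
  | a :: tail =>
    if h : tail = [] then [a]
    else a :: tail.getLast h :: pvG tail.dropLast
termination_by xs => xs.length
decreasing_by simp [List.length_dropLast]

lemma pvG_cons_concat (a c : Int) (mid : List Int) :
    pvG (a :: (mid ++ [c])) = a :: c :: pvG mid := by
  rw [pvG, dif_neg (by simp)]
  simp

lemma pvG_short (a : Int) (tail : List Int) (h : tail.length ≤ 1) :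
    pvG (a :: tail) = a :: pvG tail := by
  match tail with
  | [] => simp [pvG]
  | [b] => rw [show a :: [b] = a :: ([] ++ [b]) by simp, pvG_cons_concat]; simp [pvG]

theorem pvALoop_spec : ∀ (n : Nat) (seg : List Int), seg.length = n →
    ∀ (pre post acc : List Int) (fuel : Nat), seg.length ≤ fuel →
    acc.length = pre.length + post.length →
    pvALoop (pre ++ seg ++ post) fuel (pre.length : Int)
      ((pre.length : Int) + (seg.length : Int) - 1) acc = acc ++ pvG seg := by
  intro n
  induction n using Nat.strong_induction_on with
  | _ n ih =>
    intro seg hlen pre post acc fuel hfuel hacc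
    match seg, hlen with
    | [], _ =>
      cases fuel with
      | zero => simp [pvALoop, pvG]
      | succ fuel =>
        rw [pvALoop, if_pos (by simp [hacc])]
        simp [pvG]
    | a :: tail, hlen =>
      cases fuel with
      | zero => simp at hfuel
      | succ fuel =>
        rw [pvALoop, if_neg (by simp [hacc]; omega)]
        have hga : PySem.List.pyGetD (pre ++ (a :: tail) ++ post) (pre.length : Int) 0 = a := by
          rw [show pre ++ (a :: tail) ++ post = pre ++ a :: (tail ++ post) by simp]
          exact pvGetMid _ _ _ _
        by_cases hsh : tail.length ≤ 1
        · rw [if_neg (by simp only [List.length_cons]; push_cast; omega)]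
          have := ih tail.length (by simp at hlen; omega) tail rfl (pre ++ [a]) post (acc ++ [a]) fuel
            (by simp at hfuel; omega) (by simp [hacc]; omega)
          rw [hga]
          rw [show (pre.length : Int) + 1 = ((pre ++ [a]).length : Int) by
                simp only [List.length_cons, List.length_append, List.length_nil]; push_cast; omega,
              show (pre.length : Int) + ((a :: tail).length : Int) - 1
                 = ((pre ++ [a]).length : Int) + (tail.length : Int) - 1 by
                simp only [List.length_cons, List.length_append, List.length_nil]; push_cast; omega,
              show pre ++ (a :: tail) ++ post = (pre ++ [a]) ++ tail ++ post by simp]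
          rw [this, pvG_short a tail hsh]
          simp
        · -- tail.length ≥ 2 : decompose tail = mid ++ [c]
          obtain ⟨mid, c, hmc⟩ : ∃ mid c, tail = mid ++ [c] := by
            rcases tail.eq_nil_or_concat with h | ⟨mid, c, h⟩
            · simp [h] at hsh
            · exact ⟨mid, c, by simpa using h⟩
          subst hmc
          rw [if_pos (by
            simp only [List.length_cons, List.length_append, List.length_nil] at hsh ⊢
            push_cast; omega)]
          have hgc : PySem.List.pyGetD (pre ++ (a :: (mid ++ [c])) ++ post)
              ((pre.length : Int) + ((a :: (mid ++ [c])).length : Int) - 1) 0 = c := by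
            rw [show pre ++ (a :: (mid ++ [c])) ++ post = (pre ++ a :: mid) ++ c :: post by simp,
                show (pre.length : Int) + ((a :: (mid ++ [c])).length : Int) - 1
                   = (((pre ++ a :: mid).length : Nat) : Int) by
                  simp only [List.length_cons, List.length_append, List.length_nil]
                  push_cast; omega]
            exact pvGetMid _ _ _ _
          have := ih mid.length (by simp at hlen; omega) mid rfl (pre ++ [a]) (c :: post)
            ((acc ++ [a]) ++ [c]) fuel (by simp at hfuel ⊢; omega) (by simp [hacc]; omega)
          rw [hga, hgc]
          rw [show (pre.length : Int) + 1 = ((pre ++ [a]).length : Int) by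
                simp only [List.length_cons, List.length_append, List.length_nil]; push_cast; omega,
              show (pre.length : Int) + ((a :: (mid ++ [c])).length : Int) - 1 - 1
                 = ((pre ++ [a]).length : Int) + (mid.length : Int) - 1 by
                simp only [List.length_cons, List.length_append, List.length_nil]; push_cast; omega,
              show pre ++ (a :: (mid ++ [c])) ++ post = (pre ++ [a]) ++ mid ++ (c :: post) by simp]
          rw [this, pvG_cons_concat]
          simp

theorem pvAlt_pure : ∀ (n : Nat) (t : List Int), t.length = n →
    (((t.take (t.length - (t.length - 1) / 2)).zip
        ((t.drop (t.length - (t.length - 1) / 2)).reverse)).flatMap (fun p => [p.1, p.2]))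
      ++ (t.take (t.length - (t.length - 1) / 2)).drop
           ((t.drop (t.length - (t.length - 1) / 2)).reverse.length)
    = pvG t := by
  intro n
  induction n using Nat.strong_induction_on with
  | _ n ih =>
    intro t hlen
    match t with
    | [] => simp [pvG]
    | [a] => norm_num [pvG]
    | a :: b :: rest =>
      obtain ⟨mid, c, hmc⟩ : ∃ mid c, (b :: rest : List Int) = mid ++ [c] := by
        rcases (b :: rest).eq_nil_or_concat with h | ⟨mid, c, h⟩
        · simp at h
        · exact ⟨mid, c, by simpa using h⟩
      rw [hmc]
      match mid with
      | [] => norm_num [pvG]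
      | b' :: mid' =>
        set mid := b' :: mid' with hmid
        have hm : 1 ≤ mid.length := by simp [hmid]
        have hk : (a :: (mid ++ [c])).length - ((a :: (mid ++ [c])).length - 1) / 2
            = (mid.length - (mid.length - 1) / 2) + 1 := by simp; omega
        rw [hk]
        rw [List.take_succ_cons, List.drop_succ_cons,
            List.take_append, List.drop_append,
            show mid.length - (mid.length - 1) / 2 - mid.length = 0 by omega]
        simp only [List.take_zero, List.drop_zero, List.append_nil,
          List.reverse_append, List.reverse_cons, List.reverse_nil, List.nil_append,
          List.cons_append, List.zip_cons_cons, List.flatMap_cons, List.length_cons,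
          List.length_reverse, List.drop_succ_cons]
        have IH := ih mid.length
          (by have h2 := congrArg List.length hmc; simp at h2 hlen; omega) mid rfl
        rw [List.length_reverse] at IH
        rw [IH]
        rw [pvG_cons_concat]

theorem reaarrangeArray_eq_pvG (nums : List Int) :
    reaarrangeArray nums = pvG (PySem.List.sorted nums id false) := by
  unfold reaarrangeArray
  have := pvALoop_spec (PySem.List.sorted nums id false).length _ rfl [] []
    ([] : List Int) ((PySem.List.sorted nums id false).length + 1) (by omega) (by simp)
  simpa using this

theorem pvAlt_body (t : List Int) :
    (let h := PySem.Int.floordiv ((t.length : Int) - 1) 2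
     let low := PySem.List.slice t none (some ((t.length : Int) - h))
     let high := (PySem.List.slice t (some ((t.length : Int) - h)) none).reverse
     let result := (low.zip high).flatMap (fun p => [p.1, p.2])
     result ++ PySem.List.slice low (some ((high.length : Nat) : Int)) none) = pvG t := by
  cases t with
  | nil => simp [pvG, PySem.List.slice]
  | cons x xs =>
    have hl : 1 ≤ (x :: xs).length := by simp
    have hfd : PySem.Int.floordiv (((x :: xs : List Int).length : Int) - 1) 2
        = ((((x :: xs).length - 1) / 2 : Nat) : Int) := by
      rw [show (((x :: xs : List Int).length : Int) - 1) = (((x :: xs).length - 1 : Nat) : Int)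
            by omega,
          PySem.Int.floordiv_eq_ediv_of_pos (by norm_num)]
      norm_cast
    have h2 : ((x :: xs : List Int).length : Int) - ((((x :: xs).length - 1) / 2 : Nat) : Int)
        = (((x :: xs).length - ((x :: xs).length - 1) / 2 : Nat) : Int) := by omega
    simp only [hfd, h2, PySem.List.slice_to_natCast, PySem.List.slice_from_natCast]
    exact pvAlt_pure _ _ rfl

theorem reaarrangeArray_alt_eq_pvG (nums : List Int) :
    reaarrangeArray_alt nums = pvG (PySem.List.sorted nums id false) := by
  unfold reaarrangeArray_alt
  exact pvAlt_body _

-- ===== VERDICT (by name: the statement is the Claim_ definition above) =====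
theorem reaarrangeArray_spec : Claim_equal_reaarrangeArray := by
  intro nums _
  unfold Spec_reaarrangeArray
  rw [reaarrangeArray_eq_pvG, reaarrangeArray_alt_eq_pvG]
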